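-- pv_equiv track=rewrite | github.com/SangPhan-wpgg/Do_an_AI_ca_nhan_cuoi_ki | search_in_complex_environment.py | ap_dung_hanh_dong_cho_tap_niem_tin_mtk
-- ===== SOURCE A (Python) =====
-- CAC_BUOC_DI_CHUYEN_MTK = {
--     'Up': -3,
--     'Down': 3,
--     'Left': -1,
--     'Right': 1
-- }
--
-- def kiem_tra_di_chuyen_hop_le_mtk(vi_tri_so_khong_mtk, huong_mtk):
--     if huong_mtk == 'Up' and vi_tri_so_khong_mtk < 3:
--         return False
--     if huong_mtk == 'Down' and vi_tri_so_khong_mtk > 5: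
--         return False
--     if huong_mtk == 'Left' and vi_tri_so_khong_mtk % 3 == 0:
--         return False
--     if huong_mtk == 'Right' and vi_tri_so_khong_mtk % 3 == 2:
--         return False
--     return True
--
-- def thuc_hien_di_chuyen_mtk(trang_thai_mtk: tuple, huong_mtk: str):
--     vi_tri_so_khong_mtk = trang_thai_mtk.index(0)
--     if not kiem_tra_di_chuyen_hop_le_mtk(vi_tri_so_khong_mtk, huong_mtk):
--         return None
--     vi_tri_moi_mtk = vi_tri_so_khong_mtk + CAC_BUOC_DI_CHUYEN_MTK[huong_mtk]
--     trang_thai_moi_list_mtk = list(trang_thai_mtk)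
--     trang_thai_moi_list_mtk[vi_tri_so_khong_mtk], trang_thai_moi_list_mtk[vi_tri_moi_mtk] = trang_thai_moi_list_mtk[vi_tri_moi_mtk], trang_thai_moi_list_mtk[vi_tri_so_khong_mtk]
--     return tuple(trang_thai_moi_list_mtk)
--
-- def ap_dung_hanh_dong_cho_tap_niem_tin_mtk(tap_niem_tin_mtk: list, hanh_dong_mtk: str, tap_trang_thai_dich_mtk: list, la_quan_sat_mot_phan_mtk: bool = False):
--     tap_ket_qua_mtk = []
--     cac_trang_thai_da_tham_trong_tap_mtk = set()
--     for trang_thai_trong_niem_tin_mtk in tap_niem_tin_mtk: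
--         trang_thai_moi_sau_hanh_dong_mtk = thuc_hien_di_chuyen_mtk(trang_thai_trong_niem_tin_mtk, hanh_dong_mtk)
--         if trang_thai_moi_sau_hanh_dong_mtk is None:
--             trang_thai_moi_sau_hanh_dong_mtk = trang_thai_trong_niem_tin_mtk
--
--         if trang_thai_moi_sau_hanh_dong_mtk not in cac_trang_thai_da_tham_trong_tap_mtk:
--             cac_trang_thai_da_tham_trong_tap_mtk.add(trang_thai_moi_sau_hanh_dong_mtk)
--             if la_quan_sat_mot_phan_mtk:
--                 if kiem_tra_gan_dich_mtk(trang_thai_moi_sau_hanh_dong_mtk, tap_trang_thai_dich_mtk):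
--                     tap_ket_qua_mtk.append(trang_thai_moi_sau_hanh_dong_mtk)
--             else:
--                 tap_ket_qua_mtk.append(trang_thai_moi_sau_hanh_dong_mtk)
--     return tap_ket_qua_mtk
--
-- def kiem_tra_gan_dich_mtk(trang_thai_mtk:tuple, tap_trang_thai_dich_mtk:list) -> bool:
--     if not tap_trang_thai_dich_mtk: return False
--     return trang_thai_mtk[:3] == tap_trang_thai_dich_mtk[0][:3] # Giả định so sánh 3 phần tử đầu
-- ===== SOURCE B (Python) =====
-- CAC_BUOC_DI_CHUYEN_MTK = {
--     'Up': -3,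
--     'Down': 3,
--     'Left': -1,
--     'Right': 1
-- }
--
-- def kiem_tra_di_chuyen_hop_le_mtk(vi_tri_so_khong_mtk, huong_mtk):
--     if huong_mtk == 'Up' and vi_tri_so_khong_mtk < 3:
--         return False
--     if huong_mtk == 'Down' and vi_tri_so_khong_mtk > 5:
--         return False
--     if huong_mtk == 'Left' and vi_tri_so_khong_mtk % 3 == 0:
--         return False
--     if huong_mtk == 'Right' and vi_tri_so_khong_mtk % 3 == 2:
--         return False
--     return True
--
-- def thuc_hien_di_chuyen_mtk(trang_thai_mtk: tuple, huong_mtk: str):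
--     vi_tri_so_khong_mtk = trang_thai_mtk.index(0)
--     if not kiem_tra_di_chuyen_hop_le_mtk(vi_tri_so_khong_mtk, huong_mtk):
--         return None
--     vi_tri_moi_mtk = vi_tri_so_khong_mtk + CAC_BUOC_DI_CHUYEN_MTK[huong_mtk]
--     trang_thai_moi_list_mtk = list(trang_thai_mtk)
--     trang_thai_moi_list_mtk[vi_tri_so_khong_mtk], trang_thai_moi_list_mtk[vi_tri_moi_mtk] = trang_thai_moi_list_mtk[vi_tri_moi_mtk], trang_thai_moi_list_mtk[vi_tri_so_khong_mtk]
--     return tuple(trang_thai_moi_list_mtk)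
--
-- def kiem_tra_gan_dich_mtk(trang_thai_mtk: tuple, tap_trang_thai_dich_mtk: list) -> bool:
--     if not tap_trang_thai_dich_mtk:
--         return False
--     return trang_thai_mtk[:3] == tap_trang_thai_dich_mtk[0][:3]
--
-- def loai_bo_lap_lai_mtk(day_mtk):
--     # First-occurrence dedup by recursion: keep the head, strip every later copy
--     # of it from the remainder, recurse. No visited set / dict is maintained.
--     if not day_mtk:
--         return []
--     dau_mtk = day_mtk[0]
--     return [dau_mtk] + loai_bo_lap_lai_mtk([x for x in day_mtk[1:] if x != dau_mtk])
--
-- def ap_dung_hanh_dong_cho_tap_niem_tin_mtk(tap_niem_tin_mtk: list, hanh_dong_mtk: str, tap_trang_thai_dich_mtk: list, la_quan_sat_mot_phan_mtk: bool = False):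
--     da_chuyen_mtk = []
--     for t in tap_niem_tin_mtk:
--         kq = thuc_hien_di_chuyen_mtk(t, hanh_dong_mtk)
--         da_chuyen_mtk.append(t if kq is None else kq)
--     # Under partial observation the near-goal filter is applied BEFORE dedup
--     # (it is a pure predicate on the state, so this commutes with dedup).
--     if la_quan_sat_mot_phan_mtk:
--         da_chuyen_mtk = [t for t in da_chuyen_mtk if kiem_tra_gan_dich_mtk(t, tap_trang_thai_dich_mtk)]
--     return loai_bo_lap_lai_mtk(da_chuyen_mtk)
-- ===== Notes on version B (the rewrite author's own statement) =====
-- stated objective: alternative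
-- what changed: Drops A's visited-set accumulator entirely: B transforms the belief states, applies the near-goal filter BEFORE deduplication (proved to commute), and deduplicates by structural recursion that keeps the head and strips its later copies from the remainder, instead of A's single fused loop with a set-membership test.
import Mathlib
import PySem

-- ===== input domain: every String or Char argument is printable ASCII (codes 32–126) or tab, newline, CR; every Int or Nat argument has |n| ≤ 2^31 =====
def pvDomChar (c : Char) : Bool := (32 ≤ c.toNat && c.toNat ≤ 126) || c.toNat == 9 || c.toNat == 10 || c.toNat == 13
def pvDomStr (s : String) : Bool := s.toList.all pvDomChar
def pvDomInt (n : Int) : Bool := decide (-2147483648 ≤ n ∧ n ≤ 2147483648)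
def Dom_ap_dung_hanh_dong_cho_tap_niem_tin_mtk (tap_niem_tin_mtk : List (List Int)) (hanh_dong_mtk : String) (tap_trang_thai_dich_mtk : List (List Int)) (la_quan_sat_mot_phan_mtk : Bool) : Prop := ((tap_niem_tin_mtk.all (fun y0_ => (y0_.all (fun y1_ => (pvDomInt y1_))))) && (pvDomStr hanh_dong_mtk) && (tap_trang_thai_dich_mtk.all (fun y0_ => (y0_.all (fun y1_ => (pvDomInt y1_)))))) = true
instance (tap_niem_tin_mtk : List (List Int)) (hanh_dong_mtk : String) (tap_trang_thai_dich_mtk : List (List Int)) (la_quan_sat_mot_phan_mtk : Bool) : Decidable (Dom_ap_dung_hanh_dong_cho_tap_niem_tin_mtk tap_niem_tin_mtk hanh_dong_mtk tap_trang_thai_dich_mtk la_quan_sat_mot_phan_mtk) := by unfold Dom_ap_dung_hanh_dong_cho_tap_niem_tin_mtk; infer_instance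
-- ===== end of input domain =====

-- B drops A's visited-set accumulator: it filters (under partial observation) before dedup and
-- deduplicates by recursion that strips the head's later copies from the remainder (alternative).

-- ===== PORT A =====
-- CAC_BUOC_DI_CHUYEN_MTK (dict literal, insertion order)
def pvCacBuocDiChuyenMtk : PySem.Dict String Int :=
  ⟨[("Up", (-3 : Int)), ("Down", 3), ("Left", -1), ("Right", 1)]⟩

def kiem_tra_di_chuyen_hop_le_mtk (vi_tri_so_khong_mtk : Int) (huong_mtk : String) : Bool :=
  if huong_mtk == "Up" && vi_tri_so_khong_mtk < 3 then false
  else if huong_mtk == "Down" && vi_tri_so_khong_mtk > 5 then false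
  else if huong_mtk == "Left" && PySem.Int.mod vi_tri_so_khong_mtk 3 == 0 then false
  else if huong_mtk == "Right" && PySem.Int.mod vi_tri_so_khong_mtk 3 == 2 then false
  else true

-- trang_thai.index(0): ValueError (no 0) excluded by Pre_; dict[huong]: KeyError excluded by Pre_;
-- the tuple-swap's element reads/writes: IndexError excluded by Pre_ (the getD defaults are unreachable there).
def thuc_hien_di_chuyen_mtk (trang_thai_mtk : List Int) (huong_mtk : String) : Option (List Int) :=
  let vi_tri_so_khong_mtk : Int := ((PySem.List.index? trang_thai_mtk 0).getD 0 : Nat)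
  if !kiem_tra_di_chuyen_hop_le_mtk vi_tri_so_khong_mtk huong_mtk then none
  else
    let vi_tri_moi_mtk : Int := vi_tri_so_khong_mtk + PySem.Dict.getD pvCacBuocDiChuyenMtk huong_mtk 0
    let gia_tri_moi := PySem.List.pyGetD trang_thai_mtk vi_tri_moi_mtk 0
    let gia_tri_cu := PySem.List.pyGetD trang_thai_mtk vi_tri_so_khong_mtk 0
    some (PySem.List.pySetD (PySem.List.pySetD trang_thai_mtk vi_tri_so_khong_mtk gia_tri_moi) vi_tri_moi_mtk gia_tri_cu)

def kiem_tra_gan_dich_mtk (trang_thai_mtk : List Int) (tap_trang_thai_dich_mtk : List (List Int)) : Bool :=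
  match tap_trang_thai_dich_mtk with
  | [] => false
  | dich0 :: _ =>
      PySem.List.slice trang_thai_mtk none (some 3) == PySem.List.slice dich0 none (some 3)

-- the literal body of A's for-loop (one belief state processed against the accumulator)
def pvStepA (hanh_dong_mtk : String) (tap_trang_thai_dich_mtk : List (List Int)) (la_quan_sat_mot_phan_mtk : Bool)
    (acc : List (List Int) × PySem.Set (List Int)) (trang_thai_trong_niem_tin_mtk : List Int) :
    List (List Int) × PySem.Set (List Int) :=
  let trang_thai_moi_sau_hanh_dong_mtk :=
    (thuc_hien_di_chuyen_mtk trang_thai_trong_niem_tin_mtk hanh_dong_mtk).getD trang_thai_trong_niem_tin_mtk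
  if !(PySem.Set.contains acc.2 trang_thai_moi_sau_hanh_dong_mtk) then
    let tham := PySem.Set.add acc.2 trang_thai_moi_sau_hanh_dong_mtk
    if la_quan_sat_mot_phan_mtk then
      if kiem_tra_gan_dich_mtk trang_thai_moi_sau_hanh_dong_mtk tap_trang_thai_dich_mtk then
        (acc.1 ++ [trang_thai_moi_sau_hanh_dong_mtk], tham)
      else (acc.1, tham)
    else (acc.1 ++ [trang_thai_moi_sau_hanh_dong_mtk], tham)
  else acc

def ap_dung_hanh_dong_cho_tap_niem_tin_mtk (tap_niem_tin_mtk : List (List Int)) (hanh_dong_mtk : String) (tap_trang_thai_dich_mtk : List (List Int)) (la_quan_sat_mot_phan_mtk : Bool) : List (List Int) :=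
  (tap_niem_tin_mtk.foldl (pvStepA hanh_dong_mtk tap_trang_thai_dich_mtk la_quan_sat_mot_phan_mtk)
    ([], PySem.Set.empty)).1

-- ===== PORT B =====
-- B's recursive first-occurrence dedup: keep the head, strip its later copies, recurse.
def loai_bo_lap_lai_mtk : List (List Int) → List (List Int)
  | [] => []
  | dau_mtk :: phan_con => dau_mtk :: loai_bo_lap_lai_mtk (phan_con.filter (fun x => x != dau_mtk))
termination_by l => l.length
decreasing_by simpa using Nat.lt_succ_of_le (List.length_filter_le _ _)

def ap_dung_hanh_dong_cho_tap_niem_tin_mtk_alt (tap_niem_tin_mtk : List (List Int)) (hanh_dong_mtk : String) (tap_trang_thai_dich_mtk : List (List Int)) (la_quan_sat_mot_phan_mtk : Bool) : List (List Int) :=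
  let da_chuyen_mtk := tap_niem_tin_mtk.map
    (fun t => (thuc_hien_di_chuyen_mtk t hanh_dong_mtk).getD t)
  let da_loc_mtk :=
    if la_quan_sat_mot_phan_mtk then
      da_chuyen_mtk.filter (fun t => kiem_tra_gan_dich_mtk t tap_trang_thai_dich_mtk)
    else da_chuyen_mtk
  loai_bo_lap_lai_mtk da_loc_mtk

-- ===== PRECONDITION & SPEC =====
-- Pre_ excludes exactly the inputs on which A raises: a belief state without a 0 (ValueError from
-- .index(0)), an unknown action applied to a nonempty belief set (KeyError from the step dict), and a
-- valid Down/Right move whose target index falls past the end of the state (IndexError from the swap).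
def Pre_ap_dung_hanh_dong_cho_tap_niem_tin_mtk (tap_niem_tin_mtk : List (List Int)) (hanh_dong_mtk : String) (tap_trang_thai_dich_mtk : List (List Int)) (la_quan_sat_mot_phan_mtk : Bool) : Prop :=
  (tap_niem_tin_mtk ≠ [] → hanh_dong_mtk ∈ (["Up", "Down", "Left", "Right"] : List String)) ∧
  ∀ s ∈ tap_niem_tin_mtk, (0 : Int) ∈ s ∧
    ((hanh_dong_mtk = "Down" ∧ (PySem.List.index? s (0 : Int)).getD 0 < 6) →
        (PySem.List.index? s (0 : Int)).getD 0 + 3 < s.length) ∧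
    ((hanh_dong_mtk = "Right" ∧ (PySem.List.index? s (0 : Int)).getD 0 % 3 ≠ 2) →
        (PySem.List.index? s (0 : Int)).getD 0 + 1 < s.length)
instance (tap_niem_tin_mtk : List (List Int)) (hanh_dong_mtk : String) (tap_trang_thai_dich_mtk : List (List Int)) (la_quan_sat_mot_phan_mtk : Bool) : Decidable (Pre_ap_dung_hanh_dong_cho_tap_niem_tin_mtk tap_niem_tin_mtk hanh_dong_mtk tap_trang_thai_dich_mtk la_quan_sat_mot_phan_mtk) := by unfold Pre_ap_dung_hanh_dong_cho_tap_niem_tin_mtk; infer_instance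

def pvWitness_ap_dung_hanh_dong_cho_tap_niem_tin_mtk : List (List Int) × String × List (List Int) × Bool :=
  ([[1, 0, 2, 3, 4, 5, 6, 7, 8], [1, 2, 0, 3, 4, 5, 6, 7, 8]], "Right", [[1, 2, 0]], true)

def Spec_ap_dung_hanh_dong_cho_tap_niem_tin_mtk (tap_niem_tin_mtk : List (List Int)) (hanh_dong_mtk : String) (tap_trang_thai_dich_mtk : List (List Int)) (la_quan_sat_mot_phan_mtk : Bool) (out : List (List Int)) : Prop := out = ap_dung_hanh_dong_cho_tap_niem_tin_mtk_alt tap_niem_tin_mtk hanh_dong_mtk tap_trang_thai_dich_mtk la_quan_sat_mot_phan_mtk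
instance (tap_niem_tin_mtk : List (List Int)) (hanh_dong_mtk : String) (tap_trang_thai_dich_mtk : List (List Int)) (la_quan_sat_mot_phan_mtk : Bool) (out : List (List Int)) : Decidable (Spec_ap_dung_hanh_dong_cho_tap_niem_tin_mtk tap_niem_tin_mtk hanh_dong_mtk tap_trang_thai_dich_mtk la_quan_sat_mot_phan_mtk out) := by unfold Spec_ap_dung_hanh_dong_cho_tap_niem_tin_mtk; infer_instance

-- ===== CLAIM (what is proved, stated in full; the proofs are below) =====
def Claim_equal_ap_dung_hanh_dong_cho_tap_niem_tin_mtk : Prop := ∀ (tap_niem_tin_mtk : List (List Int)) (hanh_dong_mtk : String) (tap_trang_thai_dich_mtk : List (List Int)) (la_quan_sat_mot_phan_mtk : Bool), Dom_ap_dung_hanh_dong_cho_tap_niem_tin_mtk tap_niem_tin_mtk hanh_dong_mtk tap_trang_thai_dich_mtk la_quan_sat_mot_phan_mtk → Pre_ap_dung_hanh_dong_cho_tap_niem_tin_mtk tap_niem_tin_mtk hanh_dong_mtk tap_trang_thai_dich_mtk la_quan_sat_mot_phan_mtk → Spec_ap_dung_hanh_dong_cho_tap_niem_tin_mtk tap_niem_tin_mtk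 hanh_dong_mtk tap_trang_thai_dich_mtk la_quan_sat_mot_phan_mtk (ap_dung_hanh_dong_cho_tap_niem_tin_mtk tap_niem_tin_mtk hanh_dong_mtk tap_trang_thai_dich_mtk la_quan_sat_mot_phan_mtk)

-- ===== LEMMAS AND PROOFS =====

-- folding PySem.Set.add only ever appends to the accumulator
theorem pvFoldlAddAppend {a : Type} [BEq a] (l : List a) (vis : List a) :
    ∃ T, l.foldl PySem.Set.add vis = vis ++ T := by
  induction l generalizing vis with
  | nil => exact ⟨[], by simp⟩
  | cons x l ih =>
      rw [List.foldl_cons]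
      by_cases hc : PySem.Set.contains vis x
      · have h1 : PySem.Set.add vis x = vis := by simp [PySem.Set.add, PySem.Set.contains] at hc ⊢; simp [hc]
        rw [h1]; exact ih vis
      · have h1 : PySem.Set.add vis x = vis ++ [x] := by simp [PySem.Set.add, PySem.Set.contains] at hc ⊢; simp [hc]
        obtain ⟨T, hT⟩ := ih (vis ++ [x])
        exact ⟨x :: T, by rw [h1, hT, List.append_assoc]; rfl⟩

-- loop invariant for A's fused fold: emitted results = filter of the states the visited set gained
theorem pvLoop (hanh_dong_mtk : String) (tap_trang_thai_dich_mtk : List (List Int)) (la_quan_sat_mot_phan_mtk : Bool)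
    (l : List (List Int)) (res : List (List Int)) (vis : PySem.Set (List Int)) :
    l.foldl (pvStepA hanh_dong_mtk tap_trang_thai_dich_mtk la_quan_sat_mot_phan_mtk) (res, vis)
    = (res ++ (((l.map (fun t => (thuc_hien_di_chuyen_mtk t hanh_dong_mtk).getD t)).foldl PySem.Set.add vis).drop vis.length).filter
          (fun m => if la_quan_sat_mot_phan_mtk then kiem_tra_gan_dich_mtk m tap_trang_thai_dich_mtk else true),
       (l.map (fun t => (thuc_hien_di_chuyen_mtk t hanh_dong_mtk).getD t)).foldl PySem.Set.add vis) := by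
  induction l generalizing res vis with
  | nil => simp
  | cons t l ih =>
      rw [List.foldl_cons, List.map_cons, List.foldl_cons]
      set m := (thuc_hien_di_chuyen_mtk t hanh_dong_mtk).getD t with hm
      by_cases hc : m ∈ vis
      · have hadd : PySem.Set.add vis m = vis := by simp [PySem.Set.add, PySem.Set.contains, hc]
        have hs : pvStepA hanh_dong_mtk tap_trang_thai_dich_mtk la_quan_sat_mot_phan_mtk (res, vis) t = (res, vis) := by
          simp [pvStepA, ← hm, PySem.Set.contains, hc]
        rw [hs, hadd]
        exact ih res vis
      · have hadd : PySem.Set.add vis m = vis ++ [m] := by simp [PySem.Set.add, PySem.Set.contains, hc]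
        have hs : pvStepA hanh_dong_mtk tap_trang_thai_dich_mtk la_quan_sat_mot_phan_mtk (res, vis) t
            = (res ++ (if (if la_quan_sat_mot_phan_mtk then kiem_tra_gan_dich_mtk m tap_trang_thai_dich_mtk else true) then [m] else []), vis ++ [m]) := by
          simp [pvStepA, ← hm, PySem.Set.contains, hc]
          cases la_quan_sat_mot_phan_mtk with
          | false => simp
          | true => by_cases hg : kiem_tra_gan_dich_mtk m tap_trang_thai_dich_mtk <;> simp [hg]
        obtain ⟨T, hT⟩ := pvFoldlAddAppend (l.map (fun t => (thuc_hien_di_chuyen_mtk t hanh_dong_mtk).getD t)) (vis ++ [m])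
        have hdrop1 : ((l.map (fun t => (thuc_hien_di_chuyen_mtk t hanh_dong_mtk).getD t)).foldl PySem.Set.add (vis ++ [m])).drop vis.length = m :: T := by
          rw [hT, List.append_assoc, List.drop_left]; rfl
        have hdrop2 : ((l.map (fun t => (thuc_hien_di_chuyen_mtk t hanh_dong_mtk).getD t)).foldl PySem.Set.add (vis ++ [m])).drop (vis ++ [m]).length = T := by
          rw [hT, List.drop_left]
        rw [hs, hadd, ih (res ++ (if (if la_quan_sat_mot_phan_mtk then kiem_tra_gan_dich_mtk m tap_trang_thai_dich_mtk else true) then [m] else [])) (vis ++ [m]),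
            hdrop2, hdrop1, List.filter_cons]
        by_cases hk : (if la_quan_sat_mot_phan_mtk then kiem_tra_gan_dich_mtk m tap_trang_thai_dich_mtk else true) = true <;>
          simp [hk]

-- unfolding equations for B's recursive dedup
theorem loai_nil : loai_bo_lap_lai_mtk [] = [] := by rw [loai_bo_lap_lai_mtk]
theorem loai_cons (d : List Int) (t : List (List Int)) :
    loai_bo_lap_lai_mtk (d :: t) = d :: loai_bo_lap_lai_mtk (t.filter (fun x => x != d)) := by
  rw [loai_bo_lap_lai_mtk]

-- A's visited-set fold computes B's recursive dedup of the not-yet-visited states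
theorem pvFoldlAddLoaiBo (l : List (List Int)) (vis : List (List Int)) :
    l.foldl PySem.Set.add vis = vis ++ loai_bo_lap_lai_mtk (l.filter (fun x => !vis.contains x)) := by
  induction l generalizing vis with
  | nil => simp [loai_nil]
  | cons x l ih =>
      rw [List.foldl_cons, List.filter_cons]
      by_cases hc : x ∈ vis
      · have hadd : PySem.Set.add vis x = vis := by simp [PySem.Set.add, PySem.Set.contains, hc]
        have hif : (if (!vis.contains x) = true then x :: l.filter (fun y => !vis.contains y)
            else l.filter (fun y => !vis.contains y)) = l.filter (fun y => !vis.contains y) := by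
          simp [hc]
        rw [hadd, hif, ih]
      · have hadd : PySem.Set.add vis x = vis ++ [x] := by simp [PySem.Set.add, PySem.Set.contains, hc]
        have hif : (if (!vis.contains x) = true then x :: l.filter (fun y => !vis.contains y)
            else l.filter (fun y => !vis.contains y)) = x :: l.filter (fun y => !vis.contains y) := by
          simp [hc]
        rw [hadd, hif, ih, loai_cons, List.append_assoc, List.singleton_append,
          List.filter_filter]
        have hpred : ∀ y ∈ l, (!(vis ++ [x]).contains y) = ((y != x) && !vis.contains y) := by
          intro y _
          simp only [List.contains_eq_mem, List.mem_append, List.mem_singleton]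
          cases hyx : (y != x) <;> cases hyv : (y ∈ vis : Bool) <;> simp_all [bne_iff_ne]
        rw [List.filter_congr hpred]

-- the near-goal filter (a pure predicate) commutes with B's recursive dedup
theorem pvFilterLoaiBoAux (p : List Int → Bool) :
    ∀ (n : Nat) (l : List (List Int)), l.length ≤ n →
      (loai_bo_lap_lai_mtk l).filter p = loai_bo_lap_lai_mtk (l.filter p) := by
  intro n
  induction n with
  | zero =>
      intro l hl
      rw [List.length_eq_zero_iff.mp (Nat.le_zero.mp hl), loai_nil]
      simp [loai_nil]
  | succ n ih =>
      intro l hl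
      match l with
      | [] => simp [loai_nil]
      | dau :: phan_con =>
          have hlen : phan_con.length ≤ n := Nat.le_of_succ_le_succ hl
          rw [loai_cons, List.filter_cons, List.filter_cons]
          by_cases hp : p dau
          · rw [if_pos hp, if_pos hp, ih _ (le_trans (List.length_filter_le _ _) hlen), loai_cons]
            congr 2
            rw [List.filter_filter, List.filter_filter]
            apply List.filter_congr
            intro y _
            cases hpy : p y <;> cases hyd : (y != dau) <;> simp
          · rw [if_neg (by simpa using hp), if_neg (by simpa using hp),
              ih _ (le_trans (List.length_filter_le _ _) hlen)]
            congr 1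
            rw [List.filter_filter]
            apply List.filter_congr
            intro y _
            cases hpy : p y
            · simp
            · have hne : y ≠ dau := fun h => hp (h ▸ hpy)
              simp [bne_iff_ne, hne]

theorem pvFilterLoaiBo (p : List Int → Bool) (l : List (List Int)) :
    (loai_bo_lap_lai_mtk l).filter p = loai_bo_lap_lai_mtk (l.filter p) :=
  pvFilterLoaiBoAux p l.length l (le_refl _)

-- ===== VERDICT (by name: the statement is the Claim_ definition above) =====
theorem ap_dung_hanh_dong_cho_tap_niem_tin_mtk_spec : Claim_equal_ap_dung_hanh_dong_cho_tap_niem_tin_mtk := by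
  intro tap_niem_tin_mtk hanh_dong_mtk tap_trang_thai_dich_mtk la_quan_sat_mot_phan_mtk _hdom _hpre
  unfold Spec_ap_dung_hanh_dong_cho_tap_niem_tin_mtk
  unfold ap_dung_hanh_dong_cho_tap_niem_tin_mtk ap_dung_hanh_dong_cho_tap_niem_tin_mtk_alt
  rw [pvLoop]
  have hbase :
      (tap_niem_tin_mtk.map (fun t => (thuc_hien_di_chuyen_mtk t hanh_dong_mtk).getD t)).foldl
          PySem.Set.add ([] : List (List Int))
        = loai_bo_lap_lai_mtk (tap_niem_tin_mtk.map (fun t => (thuc_hien_di_chuyen_mtk t hanh_dong_mtk).getD t)) := by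
    rw [pvFoldlAddLoaiBo]
    simp
  cases la_quan_sat_mot_phan_mtk with
  | false => simp [PySem.Set.empty, hbase]
  | true =>
      simp only [PySem.Set.empty, List.length_nil, List.drop_zero, List.nil_append, if_true]
      rw [hbase, pvFilterLoaiBo]
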